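-- pv_equiv track=rewrite | github.com/arunkhattri/HackerRank | Algorithm/queens_attack.py | max_diag_left_down
-- ===== SOURCE A (Python) =====
-- def max_diag_left_down(row, col, dim):
--     move_count = 0
--     low_lim = 0
--     # diagonal left down moves
--     dld_i, dld_j = row - 1, col - 1
--     while dld_i > low_lim and dld_j > low_lim:
--         move_count += 1
--         dld_i -= 1
--         dld_j -= 1
--     return move_count
-- ===== SOURCE B (Python) =====
-- def max_diag_left_down(row, col, dim):
--     # closed form: the loop counts min(row-1, col-1), clamped at 0
--     return max(0, min(row - 1, col - 1))
-- ===== Notes on version B (the rewrite author's own statement) =====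
-- stated objective: simpler
-- what changed: Replaced the decrementing while-loop with the closed-form expression max(0, min(row-1, col-1)).
import Mathlib
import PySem

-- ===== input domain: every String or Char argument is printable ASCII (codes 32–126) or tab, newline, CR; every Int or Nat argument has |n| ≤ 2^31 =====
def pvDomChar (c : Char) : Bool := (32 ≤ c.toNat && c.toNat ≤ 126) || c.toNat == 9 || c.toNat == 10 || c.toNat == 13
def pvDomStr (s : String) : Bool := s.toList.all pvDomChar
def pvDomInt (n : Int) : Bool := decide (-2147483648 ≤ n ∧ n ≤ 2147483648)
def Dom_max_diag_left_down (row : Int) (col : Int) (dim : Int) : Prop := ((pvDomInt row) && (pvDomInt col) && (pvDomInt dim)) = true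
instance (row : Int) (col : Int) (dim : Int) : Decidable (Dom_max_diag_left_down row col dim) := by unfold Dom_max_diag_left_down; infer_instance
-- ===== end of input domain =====

-- ===== PORT A =====
-- while dld_i > 0 and dld_j > 0: move_count += 1; dld_i -= 1; dld_j -= 1
def pvLoopA (i j acc : Int) : Int :=
  if i > 0 ∧ j > 0 then pvLoopA (i - 1) (j - 1) (acc + 1) else acc
termination_by i.toNat
decreasing_by omega

-- header: B replaces A's loop with the closed form max(0, min(row-1, col-1)) (simpler, O(1)).
def max_diag_left_down (row : Int) (col : Int) (dim : Int) : Int :=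
  pvLoopA (row - 1) (col - 1) 0

-- ===== PORT B =====
def max_diag_left_down_alt (row : Int) (col : Int) (dim : Int) : Int :=
  max 0 (min (row - 1) (col - 1))

-- ===== PRECONDITION & SPEC =====
def Spec_max_diag_left_down (row : Int) (col : Int) (dim : Int) (out : Int) : Prop := out = max_diag_left_down_alt row col dim
instance (row : Int) (col : Int) (dim : Int) (out : Int) : Decidable (Spec_max_diag_left_down row col dim out) := by unfold Spec_max_diag_left_down; infer_instance

-- ===== CLAIM (what is proved, stated in full; the proofs are below) =====
def Claim_equal_max_diag_left_down : Prop := ∀ (row : Int) (col : Int) (dim : Int), Dom_max_diag_left_down row col dim → Spec_max_diag_left_down row col dim (max_diag_left_down row col dim)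

-- ===== LEMMAS AND PROOFS =====

-- ===== VERDICT (by name: the statement is the Claim_ definition above) =====
theorem pvLoopA_eq (i j acc : Int) : pvLoopA i j acc = acc + max 0 (min i j) := by
  generalize h : i.toNat = n
  induction n generalizing i j acc with
  | zero =>
    rw [pvLoopA]
    have : ¬ (i > 0 ∧ j > 0) := by omega
    simp only [if_neg this]
    omega
  | succ n ih =>
    rw [pvLoopA]
    by_cases hc : i > 0 ∧ j > 0
    · simp only [if_pos hc]
      rw [ih (i - 1) (j - 1) (acc + 1) (by omega)]
      omega
    · simp only [if_neg hc]; omega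

theorem max_diag_left_down_spec : Claim_equal_max_diag_left_down := by
  intro row col dim _
  unfold Spec_max_diag_left_down max_diag_left_down max_diag_left_down_alt
  rw [pvLoopA_eq]
  omega
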